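-- pv_equiv track=rewrite | github.com/praveer922/meetup-planner-bot | meetupplanner.py | calculateMaxOccurenceFromDateMatrix
-- ===== SOURCE A (Python) =====
-- def calculateMaxOccurenceFromDateMatrix(dateMatrix):
--     maxCount = 0
--     best_i = 0
--     for i in range(0,len(dateMatrix[0])):
--         count = 0
--         for j in range(0, len(dateMatrix)):
--             if dateMatrix[j][i] == 1:
--                 count = count +1
--         if count > maxCount:
--             maxCount = count
--             best_i = i
--     return best_i
-- ===== SOURCE B (Python) =====
-- def calculateMaxOccurenceFromDateMatrix(dateMatrix):
--     counts = [0] * len(dateMatrix[0])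
--     for row in dateMatrix:
--         counts = [c + (1 if row[i] == 1 else 0) for i, c in enumerate(counts)]
--     best_i = 0
--     maxCount = 0
--     for i, c in enumerate(counts):
--         if c > maxCount:
--             maxCount = c
--             best_i = i
--     return best_i
-- ===== Notes on version B (the rewrite author's own statement) =====
-- stated objective: alternative
-- what changed: Replaces A's per-column rescan of all rows (column-major nested loops) by one row-major pass that maintains a counts table, followed by a separate argmax scan over that table.
import Mathlib
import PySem

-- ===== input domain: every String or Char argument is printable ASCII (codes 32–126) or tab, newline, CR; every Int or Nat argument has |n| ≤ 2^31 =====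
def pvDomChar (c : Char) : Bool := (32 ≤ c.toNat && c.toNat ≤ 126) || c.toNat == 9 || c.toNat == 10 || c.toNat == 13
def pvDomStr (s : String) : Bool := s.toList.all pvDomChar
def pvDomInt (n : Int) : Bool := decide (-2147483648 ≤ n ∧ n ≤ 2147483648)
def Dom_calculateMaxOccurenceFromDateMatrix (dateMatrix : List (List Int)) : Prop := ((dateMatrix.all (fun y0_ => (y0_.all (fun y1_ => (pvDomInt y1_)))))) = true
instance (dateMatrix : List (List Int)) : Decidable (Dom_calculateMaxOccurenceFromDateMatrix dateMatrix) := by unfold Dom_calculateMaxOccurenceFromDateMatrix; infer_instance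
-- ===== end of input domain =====

-- B replaces A's per-column rescans (column-major nested loops) by one row-major pass
-- maintaining a counts table plus a separate argmax scan; alternative decomposition, same cost.


-- ===== PORT A =====
def calculateMaxOccurenceFromDateMatrix (dateMatrix : List (List Int)) : Int :=
  let st := (PySem.List.pyRange 0 (PySem.List.len (PySem.List.pyGetD dateMatrix 0 []))).foldl
    (fun (st : Int × Int) i =>
      let count := (PySem.List.pyRange 0 (PySem.List.len dateMatrix)).foldl
        (fun (c : Int) j =>
          if PySem.List.pyGetD (PySem.List.pyGetD dateMatrix j []) i 0 = 1 then c + 1 else c) 0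
      if count > st.1 then (count, i) else st)
    ((0 : Int), (0 : Int))
  st.2

-- ===== PORT B =====
def calculateMaxOccurenceFromDateMatrix_alt (dateMatrix : List (List Int)) : Int :=
  let counts := dateMatrix.foldl
    (fun cs row => (PySem.List.enumerate cs).map
      (fun p => p.2 + (if PySem.List.pyGetD row p.1 0 = 1 then 1 else 0)))
    (List.replicate (PySem.List.pyGetD dateMatrix 0 []).length (0 : Int))
  let st := (PySem.List.enumerate counts).foldl
    (fun (st : Int × Int) p => if p.2 > st.1 then (p.2, p.1) else st)
    ((0 : Int), (0 : Int))
  st.2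

-- ===== PRECONDITION & SPEC =====
-- Pre_ excludes exactly the inputs where Python A raises IndexError:
-- the empty matrix (dateMatrix[0]) and ragged matrices with a row shorter than row 0.
def Pre_calculateMaxOccurenceFromDateMatrix (dateMatrix : List (List Int)) : Prop :=
  dateMatrix ≠ [] ∧ ∀ row ∈ dateMatrix, (dateMatrix.headD []).length ≤ row.length
instance (dateMatrix : List (List Int)) : Decidable (Pre_calculateMaxOccurenceFromDateMatrix dateMatrix) := by unfold Pre_calculateMaxOccurenceFromDateMatrix; infer_instance
def pvWitness_calculateMaxOccurenceFromDateMatrix : List (List Int) := [[1, 0], [0, 1], [1, 1]]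

def Spec_calculateMaxOccurenceFromDateMatrix (dateMatrix : List (List Int)) (out : Int) : Prop := out = calculateMaxOccurenceFromDateMatrix_alt dateMatrix
instance (dateMatrix : List (List Int)) (out : Int) : Decidable (Spec_calculateMaxOccurenceFromDateMatrix dateMatrix out) := by unfold Spec_calculateMaxOccurenceFromDateMatrix; infer_instance

-- ===== CLAIM (what is proved, stated in full; the proofs are below) =====
def Claim_equal_calculateMaxOccurenceFromDateMatrix : Prop := ∀ (dateMatrix : List (List Int)), Dom_calculateMaxOccurenceFromDateMatrix dateMatrix → Pre_calculateMaxOccurenceFromDateMatrix dateMatrix → Spec_calculateMaxOccurenceFromDateMatrix dateMatrix (calculateMaxOccurenceFromDateMatrix dateMatrix)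

-- ===== LEMMAS AND PROOFS =====

-- number of 1s in column i, as A's inner loop computes it (row-major recursion)
def pvCnt (m : List (List Int)) (i : Int) : Int :=
  m.foldl (fun c row => if PySem.List.pyGetD row i 0 = 1 then c + 1 else c) 0

theorem pvCnt_eq_countP (m : List (List Int)) (i : Int) :
    pvCnt m i = (m.countP (fun row => decide (PySem.List.pyGetD row i 0 = 1)) : Int) := by
  simpa [pvCnt] using
    PySem.List.foldl_count_if (fun row => decide (PySem.List.pyGetD row i 0 = 1)) m 0

theorem pvCnt_cons (row : List Int) (m : List (List Int)) (i : Int) :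
    pvCnt (row :: m) i = (if PySem.List.pyGetD row i 0 = 1 then 1 else 0) + pvCnt m i := by
  simp [pvCnt_eq_countP, List.countP_cons]
  split_ifs <;> ring

-- B's one-row update of a counts table presented as a map over range
theorem pvStep_map (n : Nat) (g : Nat → Int) (row : List Int) :
    (PySem.List.enumerate ((List.range n).map g)).map
      (fun p => p.2 + (if PySem.List.pyGetD row p.1 0 = 1 then 1 else 0))
    = (List.range n).map
      (fun k => g k + (if PySem.List.pyGetD row (k : Int) 0 = 1 then 1 else 0)) := by
  rw [PySem.List.enumerate_eq_map_pyRange ((List.range n).map g) 0]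
  simp only [PySem.List.len, List.length_map, List.length_range, PySem.List.pyRange_zero_nat,
    List.map_map]
  apply List.map_congr_left
  intro k hk
  have h := PySem.List.getD_map_range g n k 0 (List.mem_range.mp hk)
  simp only [Function.comp, PySem.List.pyGetD_natCast, h]

-- B's whole counting pass, characterized column-wise
theorem pvCounts_map (n : Nat) (m : List (List Int)) (g : Nat → Int) :
    m.foldl (fun cs row => (PySem.List.enumerate cs).map
        (fun p => p.2 + (if PySem.List.pyGetD row p.1 0 = 1 then 1 else 0)))
      ((List.range n).map g)
    = (List.range n).map (fun k => g k + pvCnt m (k : Int)) := by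
  induction m generalizing g with
  | nil => simp [pvCnt]
  | cons row m ih =>
    simp only [List.foldl_cons, pvStep_map]
    rw [ih]
    apply List.map_congr_left
    intro k _
    rw [pvCnt_cons]
    ring

-- A's inner loop (after range/cast normalization) computes pvCnt
theorem pvInner_eq (m : List (List Int)) (i : Int) :
    List.foldl
      (fun (c : Int) (y : Nat) =>
        if PySem.List.pyGetD (PySem.List.pyGetD m (y : Int) []) i 0 = 1 then c + 1 else c)
      0 (List.range m.length) = pvCnt m i := by
  have h := PySem.List.foldl_pyRange_pyGetD m []
    (fun c row => if PySem.List.pyGetD row i 0 = 1 then c + 1 else c) (0 : Int) (le_refl 0)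
  simpa [PySem.List.len, PySem.List.pyRange_zero_nat, List.foldl_map, pvCnt] using h

theorem pv_main (dateMatrix : List (List Int)) :
    calculateMaxOccurenceFromDateMatrix dateMatrix
      = calculateMaxOccurenceFromDateMatrix_alt dateMatrix := by
  simp only [calculateMaxOccurenceFromDateMatrix, calculateMaxOccurenceFromDateMatrix_alt]
  set n := (PySem.List.pyGetD dateMatrix 0 []).length with hn
  have hrepl : List.replicate n (0 : Int) = (List.range n).map (fun _ => (0 : Int)) := by
    simp [List.map_const']
  rw [hrepl, pvCounts_map n dateMatrix (fun _ => 0)]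
  rw [PySem.List.enumerate_eq_map_pyRange
    (List.map (fun k : Nat => 0 + pvCnt dateMatrix (k : Int)) (List.range n)) 0]
  simp only [List.foldl_map, List.length_map, List.length_range, PySem.List.len,
    PySem.List.pyRange_zero_nat]
  apply congrArg (fun st : Int × Int => st.2)
  apply PySem.List.foldl_congr_mem
  intro acc k hk
  rw [pvInner_eq dateMatrix ((k : Nat) : Int)]
  have h := PySem.List.getD_map_range (fun k : Nat => 0 + pvCnt dateMatrix (k : Int)) n k 0
    (List.mem_range.mp hk)
  rw [PySem.List.pyGetD_natCast, h]
  simp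

-- ===== VERDICT (by name: the statement is the Claim_ definition above) =====
theorem calculateMaxOccurenceFromDateMatrix_spec : Claim_equal_calculateMaxOccurenceFromDateMatrix := by
  intro dateMatrix _ _
  unfold Spec_calculateMaxOccurenceFromDateMatrix
  exact pv_main dateMatrix
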